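-- pv_equiv track=rewrite | github.com/nwalker85/hlidskjalf | hlidskjalf/src/norns/tools_api.py | _categorize_tool
-- ===== SOURCE A (Python) =====
-- def _categorize_tool(name: str) -> str:
--     """Infer tool category from name."""
--     name_lower = name.lower()
--
--     # Verðandi - Platform observation
--     if any(x in name_lower for x in ["platform", "deployment", "health", "project", "list_projects", "get_project"]):
--         return "platform"
--
--     # Urðr - History/logs
--     if any(x in name_lower for x in ["log", "history", "trend", "analyze"]):
--         return "history"
--
--     # Skuld - Planning/future
--     if any(x in name_lower for x in ["plan", "allocate", "generate", "register", "predict", "nginx"]):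
--         return "planning"
--
--     # Memory tools
--     if any(x in name_lower for x in ["huginn", "frigg", "muninn", "hel", "mimir", "memory"]):
--         return "memory"
--
--     # Skills
--     if any(x in name_lower for x in ["skill", "procedural"]):
--         return "skills"
--
--     # Workspace
--     if any(x in name_lower for x in ["workspace", "file", "directory"]):
--         return "workspace"
--
--     # Web/Documents
--     if any(x in name_lower for x in ["document", "crawl", "web"]):
--         return "web"
--
--     # Graph
--     if any(x in name_lower for x in ["graph"]):
--         return "graph"
--
--     # Ollama
--     if any(x in name_lower for x in ["ollama"]):
--         return "llm"
--
--     # Subagents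
--     if any(x in name_lower for x in ["subagent", "spawn"]):
--         return "subagents"
--
--     return "custom"
-- ===== SOURCE B (Python) =====
-- # Category names, indexed by priority (0 = highest).
-- _CATS = ("platform", "history", "planning", "memory", "skills", "workspace",
--          "web", "graph", "llm", "subagents")
--
-- # Keyword -> priority index into _CATS (a hash index over all keywords).
-- _KW = {
--     "platform": 0, "deployment": 0, "health": 0, "project": 0,
--     "list_projects": 0, "get_project": 0,
--     "log": 1, "history": 1, "trend": 1, "analyze": 1,
--     "plan": 2, "allocate": 2, "generate": 2, "register": 2, "predict": 2, "nginx": 2,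
--     "huginn": 3, "frigg": 3, "muninn": 3, "hel": 3, "mimir": 3, "memory": 3,
--     "skill": 4, "procedural": 4,
--     "workspace": 5, "file": 5, "directory": 5,
--     "document": 6, "crawl": 6, "web": 6,
--     "graph": 7,
--     "ollama": 8,
--     "subagent": 9, "spawn": 9,
-- }
--
-- # The distinct keyword lengths.
-- _LENS = (3, 4, 5, 6, 7, 8, 9, 10, 11, 13)
--
--
-- def _categorize_tool(name: str) -> str:
--     """Infer tool category from name."""
--     low = name.lower()
--     best = 10
--     for i in range(len(low)):
--         for L in _LENS:
--             p = _KW.get(low[i:i + L], 10)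
--             if p < best:
--                 best = p
--     return "custom" if best == 10 else _CATS[best]
-- ===== Notes on version B (the rewrite author's own statement) =====
-- stated objective: alternative
-- what changed: Replaces A's ordered chain of substring scans (each keyword searched through the whole name) by a hash index: a keyword->priority dict, one enumeration of the name's substrings at each start position and keyword length with O(1) dict lookups, keeping the minimum matched priority and returning that category.
import Mathlib
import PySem

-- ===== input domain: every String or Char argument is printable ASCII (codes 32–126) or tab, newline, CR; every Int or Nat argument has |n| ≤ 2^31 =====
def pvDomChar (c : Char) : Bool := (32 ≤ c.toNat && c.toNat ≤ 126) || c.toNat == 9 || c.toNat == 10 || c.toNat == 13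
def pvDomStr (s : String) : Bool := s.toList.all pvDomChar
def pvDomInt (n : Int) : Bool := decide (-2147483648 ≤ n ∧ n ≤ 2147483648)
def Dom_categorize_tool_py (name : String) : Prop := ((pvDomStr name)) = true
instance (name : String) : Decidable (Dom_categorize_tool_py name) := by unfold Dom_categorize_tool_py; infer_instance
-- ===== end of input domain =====

set_option maxRecDepth 8192


-- B replaces A's ordered chain of whole-name substring scans by a keyword->priority dict looked up
-- on each substring of the name (every start position, each keyword length), keeping the minimum
-- matched priority; an alternative algorithm (not faster), same return value everywhere.

-- ===== PORT A =====
def categorize_tool_py (name : String) : String :=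
  let name_lower := PySem.Str.lower name
  if (["platform", "deployment", "health", "project", "list_projects", "get_project"].any (fun x => PySem.Str.isIn x name_lower)) then "platform"
  else if (["log", "history", "trend", "analyze"].any (fun x => PySem.Str.isIn x name_lower)) then "history"
  else if (["plan", "allocate", "generate", "register", "predict", "nginx"].any (fun x => PySem.Str.isIn x name_lower)) then "planning"
  else if (["huginn", "frigg", "muninn", "hel", "mimir", "memory"].any (fun x => PySem.Str.isIn x name_lower)) then "memory"
  else if (["skill", "procedural"].any (fun x => PySem.Str.isIn x name_lower)) then "skills"
  else if (["workspace", "file", "directory"].any (fun x => PySem.Str.isIn x name_lower)) then "workspace"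
  else if (["document", "crawl", "web"].any (fun x => PySem.Str.isIn x name_lower)) then "web"
  else if (["graph"].any (fun x => PySem.Str.isIn x name_lower)) then "graph"
  else if (["ollama"].any (fun x => PySem.Str.isIn x name_lower)) then "llm"
  else if (["subagent", "spawn"].any (fun x => PySem.Str.isIn x name_lower)) then "subagents"
  else "custom"

-- ===== PORT B =====
-- Source B's _CATS tuple: category names indexed by priority
def pvCats : List String :=
  ["platform", "history", "planning", "memory", "skills", "workspace", "web", "graph", "llm", "subagents"]

-- Source B's _KW dict: keyword -> priority index
def pvKw : PySem.Dict String Int := PySem.Dict.ofList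
  [("platform", 0),
   ("deployment", 0),
   ("health", 0),
   ("project", 0),
   ("list_projects", 0),
   ("get_project", 0),
   ("log", 1),
   ("history", 1),
   ("trend", 1),
   ("analyze", 1),
   ("plan", 2),
   ("allocate", 2),
   ("generate", 2),
   ("register", 2),
   ("predict", 2),
   ("nginx", 2),
   ("huginn", 3),
   ("frigg", 3),
   ("muninn", 3),
   ("hel", 3),
   ("mimir", 3),
   ("memory", 3),
   ("skill", 4),
   ("procedural", 4),
   ("workspace", 5),
   ("file", 5),
   ("directory", 5),
   ("document", 6),
   ("crawl", 6),
   ("web", 6),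
   ("graph", 7),
   ("ollama", 8),
   ("subagent", 9),
   ("spawn", 9)]

-- Source B's _LENS tuple: the distinct keyword lengths
def pvLens : List Int := [3, 4, 5, 6, 7, 8, 9, 10, 11, 13]

def categorize_tool_py_alt (name : String) : String :=
  let low := PySem.Str.lower name
  let best := (PySem.List.pyRange 0 (PySem.Str.len low) 1).foldl (fun best i =>
    pvLens.foldl (fun best L =>
      let p := PySem.Dict.getD pvKw (PySem.Str.slice low (some i) (some (i + L))) 10
      if p < best then p else best) best) 10
  if best == 10 then "custom" else PySem.List.pyGetD pvCats best "custom"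

-- ===== PRECONDITION & SPEC =====
def Spec_categorize_tool_py (name : String) (out : String) : Prop := out = categorize_tool_py_alt name
instance (name : String) (out : String) : Decidable (Spec_categorize_tool_py name out) := by unfold Spec_categorize_tool_py; infer_instance

-- ===== CLAIM (what is proved, stated in full; the proofs are below) =====
def Claim_equal_categorize_tool_py : Prop := ∀ (name : String), Dom_categorize_tool_py name → Spec_categorize_tool_py name (categorize_tool_py name)

-- ===== LEMMAS AND PROOFS =====

-- the items of pvKw, as a plain association list
def pvPairs : List (String × Int) :=
  [("platform", 0),
   ("deployment", 0),
   ("health", 0),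
   ("project", 0),
   ("list_projects", 0),
   ("get_project", 0),
   ("log", 1),
   ("history", 1),
   ("trend", 1),
   ("analyze", 1),
   ("plan", 2),
   ("allocate", 2),
   ("generate", 2),
   ("register", 2),
   ("predict", 2),
   ("nginx", 2),
   ("huginn", 3),
   ("frigg", 3),
   ("muninn", 3),
   ("hel", 3),
   ("mimir", 3),
   ("memory", 3),
   ("skill", 4),
   ("procedural", 4),
   ("workspace", 5),
   ("file", 5),
   ("directory", 5),
   ("document", 6),
   ("crawl", 6),
   ("web", 6),
   ("graph", 7),
   ("ollama", 8),
   ("subagent", 9),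
   ("spawn", 9)]

-- "some keyword of priority p occurs in low"
def pvMatched (low : String) (p : Int) : Prop :=
  ∃ pr ∈ pvPairs, p = pr.2 ∧ PySem.Str.isIn pr.1 low = true

-- the list of all dict lookups B performs
def pvV (low : String) : List Int :=
  (PySem.List.pyRange 0 (PySem.Str.len low) 1).flatMap (fun i =>
    pvLens.map (fun L => PySem.Dict.getD pvKw (PySem.Str.slice low (some i) (some (i + L))) 10))

lemma pvKw_items : pvKw.items = pvPairs := by decide

lemma pvKw_nodup : pvKw.keys.Nodup := by decide

lemma pvPairs_facts : ∀ pr ∈ pvPairs,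
    0 ≤ pr.2 ∧ pr.2 < 10 ∧ ((pr.1.toList.length : Int) ∈ pvLens) ∧ pr.1.toList ≠ [] := by decide

lemma pvLens_pos : ∀ L ∈ pvLens, 0 < L := by decide

-- a dict lookup that does not return the default hits a pair of the table
lemma pv_lookup_mem {s : String} {p : Int} (h : PySem.Dict.getD pvKw s 10 = p) (hp : p ≠ 10) :
    (s, p) ∈ pvPairs := by
  rw [PySem.Dict.getD_eq_get?_getD] at h
  cases hg : pvKw.get? s with
  | none => rw [hg] at h; exact absurd h.symm hp
  | some v =>
      rw [hg] at h
      simp only [Option.getD_some] at h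
      subst h
      have hm := PySem.Dict.mem_items_of_get?_eq_some pvKw hg
      rwa [pvKw_items] at hm

-- every pair of the table is found by the dict lookup
lemma pv_mem_lookup {s : String} {p : Int} (h : (s, p) ∈ pvPairs) :
    PySem.Dict.getD pvKw s 10 = p := by
  have hg : pvKw.get? s = some p :=
    (PySem.Dict.get?_eq_some_iff_mem_items pvKw s p pvKw_nodup).mpr (by rwa [pvKw_items])
  rw [PySem.Dict.getD_eq_get?_getD, hg]
  rfl

-- B's nested min-accumulator loop is a fold of `min` over the flattened lookup list
lemma pv_fold_min {α β : Type} (outer : List α) (inner : List β) (g : α → β → Int) (a : Int) :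
    outer.foldl (fun b i => inner.foldl (fun b' L => if g i L < b' then g i L else b') b) a
      = (outer.flatMap (fun i => inner.map (g i))).foldl min a := by
  induction outer generalizing a with
  | nil => simp
  | cons x xs ih =>
      simp only [List.foldl_cons, List.flatMap_cons, List.foldl_append, ih]
      congr 1
      have hf : (fun (b' : Int) L => if g x L < b' then g x L else b')
          = fun (b' : Int) L => min b' (g x L) := by
        funext b' L
        rw [min_def]
        split_ifs <;> omega
      rw [hf, List.foldl_map]

lemma pv_take_drop_infix (l : List Char) (i L : Nat) : (l.drop i).take L <:+: l :=
  ((l.drop i).take_prefix L).isInfix.trans (l.drop_suffix i).isInfix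

-- every lookup B performs is the default or a matched priority
lemma pv_V_cases (low : String) : ∀ v ∈ pvV low, v = 10 ∨ pvMatched low v := by
  intro v hv
  simp only [pvV, List.mem_flatMap, List.mem_map] at hv
  obtain ⟨i, hi, L, hL, rfl⟩ := hv
  by_cases h10 : PySem.Dict.getD pvKw (PySem.Str.slice low (some i) (some (i + L))) 10 = 10
  · left; exact h10
  · right
    have hmem := pv_lookup_mem rfl h10
    refine ⟨_, hmem, rfl, ?_⟩
    rw [PySem.Str.isIn_iff_infix]
    have hi' := (PySem.List.mem_pyRange_one).mp hi
    have hL' := pvLens_pos L hL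
    have h0i : (0:Int) ≤ i := hi'.1
    have h0iL : (0:Int) ≤ i + L := by omega
    rw [PySem.Str.toList_slice, PySem.Chars.slice_eq_listSlice,
      PySem.List.slice_toNat _ h0i h0iL]
    exact pv_take_drop_infix _ _ _

-- conversely, every matched priority appears among B's lookups
lemma pv_matched_mem (low : String) (p : Int) (h : pvMatched low p) : p ∈ pvV low := by
  obtain ⟨⟨kw, q⟩, hpr, rfl, hin⟩ := h
  obtain ⟨hq0, hq10, hlen, hne⟩ := pvPairs_facts _ hpr
  rw [PySem.Str.isIn_iff_infix] at hin
  obtain ⟨s, t, hst⟩ := hin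
  have hlcount : low.toList.length = s.length + (kw.toList.length + t.length) := by
    rw [← hst]
    simp [List.length_append]
  have hk : 0 < kw.toList.length := List.length_pos_of_ne_nil hne
  simp only [pvV, List.mem_flatMap, List.mem_map]
  refine ⟨(s.length : Int), ?_, (kw.toList.length : Int), hlen, ?_⟩
  · rw [PySem.List.mem_pyRange_one]
    refine ⟨Int.natCast_nonneg _, ?_⟩
    simp only [PySem.Str.len_eq]
    omega
  · have hslice : (PySem.Str.slice low (some (s.length : Int))
        (some ((s.length : Int) + (kw.toList.length : Int)))).toList = kw.toList := by
      rw [PySem.Str.toList_slice, PySem.Chars.slice_eq_listSlice, PySem.List.slice_natCast_add]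
      have hsplit : low.toList = s ++ (kw.toList ++ t) := by rw [← hst]; simp
      rw [hsplit, List.drop_left, List.take_left]
    have heq : PySem.Str.slice low (some (s.length : Int))
        (some ((s.length : Int) + (kw.toList.length : Int))) = kw := String.toList_inj.mp hslice
    rw [heq]
    exact pv_mem_lookup hpr

-- per-group: a matched pair from one keyword group is exactly "p is that group's priority and any() fires"
lemma pv_group_iff (ws : List String) (k p : Int) (low : String) :
    (∃ pr ∈ ws.map (fun w => (w, k)), p = pr.2 ∧ PySem.Str.isIn pr.1 low = true)
      ↔ (p = k ∧ (ws.any (fun x => PySem.Str.isIn x low)) = true) := by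
  simp only [List.mem_map, List.any_eq_true]
  constructor
  · rintro ⟨pr, ⟨w, hw, rfl⟩, rfl, hin⟩
    exact ⟨rfl, w, hw, hin⟩
  · rintro ⟨rfl, w, hw, hin⟩
    exact ⟨(w, p), ⟨w, hw, rfl⟩, rfl, hin⟩

-- a matched pair over a concatenation splits
lemma pv_exists_append (l1 l2 : List (String × Int)) (low : String) (p : Int) :
    (∃ pr ∈ l1 ++ l2, p = pr.2 ∧ PySem.Str.isIn pr.1 low = true)
      ↔ ((∃ pr ∈ l1, p = pr.2 ∧ PySem.Str.isIn pr.1 low = true)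
          ∨ (∃ pr ∈ l2, p = pr.2 ∧ PySem.Str.isIn pr.1 low = true)) := by
  simp only [List.mem_append, or_and_right, exists_or]

-- the pair table, regrouped by category
lemma pv_pairs_split : pvPairs = ["platform", "deployment", "health", "project", "list_projects", "get_project"].map (fun w => (w, (0:Int))) ++ (["log", "history", "trend", "analyze"].map (fun w => (w, (1:Int))) ++ (["plan", "allocate", "generate", "register", "predict", "nginx"].map (fun w => (w, (2:Int))) ++ (["huginn", "frigg", "muninn", "hel", "mimir", "memory"].map (fun w => (w, (3:Int))) ++ (["skill", "procedural"].map (fun w => (w, (4:Int))) ++ (["workspace", "file", "directory"].map (fun w => (w, (5:Int))) ++ (["document", "crawl", "web"].map (fun w => (w, (6:Int))) ++ (["graph"].map (fun w => (w, (7:Int))) ++ (["ollama"].map (fun w => (w, (8:Int))) ++ (["subagent", "spawn"].map (fun w => (w, (9:Int)))))))))))) := by rfl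

-- matched priorities, spelled out per category (the conditions are exactly A's tests)
lemma pv_matched_iff (low : String) (p : Int) :
    pvMatched low p ↔ (p = 0 ∧ (["platform", "deployment", "health", "project", "list_projects", "get_project"].any (fun x => PySem.Str.isIn x low)) = true) ∨ (p = 1 ∧ (["log", "history", "trend", "analyze"].any (fun x => PySem.Str.isIn x low)) = true) ∨ (p = 2 ∧ (["plan", "allocate", "generate", "register", "predict", "nginx"].any (fun x => PySem.Str.isIn x low)) = true) ∨ (p = 3 ∧ (["huginn", "frigg", "muninn", "hel", "mimir", "memory"].any (fun x => PySem.Str.isIn x low)) = true) ∨ (p = 4 ∧ (["skill", "procedural"].any (fun x => PySem.Str.isIn x low)) = true) ∨ (p = 5 ∧ (["workspace", "file", "directory"].any (fun x => PySem.Str.isIn x low)) = true) ∨ (p = 6 ∧ (["document", "crawl", "web"].any (fun x => PySem.Str.isIn x low)) = true) ∨ (p = 7 ∧ (["graph"].any (fun x => PySem.Str.isIn x low)) = true) ∨ (p = 8 ∧ (["ollama"].any (fun x => PySem.Str.isIn x low)) = true) ∨ (p = 9 ∧ (["subagent", "spawn"].any (fun x => PySem.Str.isIn x low)) = true) := by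
  unfold pvMatched
  rw [pv_pairs_split]
  simp only [pv_exists_append, pv_group_iff]

-- the per-category final case analysis, over the ten boolean tests
lemma pv_final (h0 h1 h2 h3 h4 h5 h6 h7 h8 h9 : Bool) (best : Int)
    (H1 : best = 10 ∨ ((best = 0 ∧ h0 = true) ∨ (best = 1 ∧ h1 = true) ∨ (best = 2 ∧ h2 = true) ∨ (best = 3 ∧ h3 = true) ∨ (best = 4 ∧ h4 = true) ∨ (best = 5 ∧ h5 = true) ∨ (best = 6 ∧ h6 = true) ∨ (best = 7 ∧ h7 = true) ∨ (best = 8 ∧ h8 = true) ∨ (best = 9 ∧ h9 = true)))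
    (K0 : h0 = true → best ≤ 0)
    (K1 : h1 = true → best ≤ 1)
    (K2 : h2 = true → best ≤ 2)
    (K3 : h3 = true → best ≤ 3)
    (K4 : h4 = true → best ≤ 4)
    (K5 : h5 = true → best ≤ 5)
    (K6 : h6 = true → best ≤ 6)
    (K7 : h7 = true → best ≤ 7)
    (K8 : h8 = true → best ≤ 8)
    (K9 : h9 = true → best ≤ 9)
    :
    (if h0 = true then "platform"
      else if h1 = true then "history"
      else if h2 = true then "planning"
      else if h3 = true then "memory"
      else if h4 = true then "skills"
      else if h5 = true then "workspace"
      else if h6 = true then "web"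
      else if h7 = true then "graph"
      else if h8 = true then "llm"
      else if h9 = true then "subagents"
      else "custom")
      = (if best == 10 then "custom" else PySem.List.pyGetD pvCats best "custom") := by
  rcases H1 with rfl | ⟨rfl, hb0⟩ | ⟨rfl, hb1⟩ | ⟨rfl, hb2⟩ | ⟨rfl, hb3⟩ | ⟨rfl, hb4⟩ | ⟨rfl, hb5⟩ | ⟨rfl, hb6⟩ | ⟨rfl, hb7⟩ | ⟨rfl, hb8⟩ | ⟨rfl, hb9⟩
  · have e0 : h0 = false := by cases h0 with | false => rfl | true => exact absurd (K0 rfl) (by decide)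
    have e1 : h1 = false := by cases h1 with | false => rfl | true => exact absurd (K1 rfl) (by decide)
    have e2 : h2 = false := by cases h2 with | false => rfl | true => exact absurd (K2 rfl) (by decide)
    have e3 : h3 = false := by cases h3 with | false => rfl | true => exact absurd (K3 rfl) (by decide)
    have e4 : h4 = false := by cases h4 with | false => rfl | true => exact absurd (K4 rfl) (by decide)
    have e5 : h5 = false := by cases h5 with | false => rfl | true => exact absurd (K5 rfl) (by decide)
    have e6 : h6 = false := by cases h6 with | false => rfl | true => exact absurd (K6 rfl) (by decide)
    have e7 : h7 = false := by cases h7 with | false => rfl | true => exact absurd (K7 rfl) (by decide)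
    have e8 : h8 = false := by cases h8 with | false => rfl | true => exact absurd (K8 rfl) (by decide)
    have e9 : h9 = false := by cases h9 with | false => rfl | true => exact absurd (K9 rfl) (by decide)
    simp only [e0, e1, e2, e3, e4, e5, e6, e7, e8, e9, Bool.false_eq_true, if_false]
    decide
  · simp only [hb0, if_true]
    decide
  · have e0 : h0 = false := by cases h0 with | false => rfl | true => exact absurd (K0 rfl) (by decide)
    simp only [e0, hb1, Bool.false_eq_true, if_false, if_true]
    decide
  · have e0 : h0 = false := by cases h0 with | false => rfl | true => exact absurd (K0 rfl) (by decide)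
    have e1 : h1 = false := by cases h1 with | false => rfl | true => exact absurd (K1 rfl) (by decide)
    simp only [e0, e1, hb2, Bool.false_eq_true, if_false, if_true]
    decide
  · have e0 : h0 = false := by cases h0 with | false => rfl | true => exact absurd (K0 rfl) (by decide)
    have e1 : h1 = false := by cases h1 with | false => rfl | true => exact absurd (K1 rfl) (by decide)
    have e2 : h2 = false := by cases h2 with | false => rfl | true => exact absurd (K2 rfl) (by decide)
    simp only [e0, e1, e2, hb3, Bool.false_eq_true, if_false, if_true]
    decide
  · have e0 : h0 = false := by cases h0 with | false => rfl | true => exact absurd (K0 rfl) (by decide)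
    have e1 : h1 = false := by cases h1 with | false => rfl | true => exact absurd (K1 rfl) (by decide)
    have e2 : h2 = false := by cases h2 with | false => rfl | true => exact absurd (K2 rfl) (by decide)
    have e3 : h3 = false := by cases h3 with | false => rfl | true => exact absurd (K3 rfl) (by decide)
    simp only [e0, e1, e2, e3, hb4, Bool.false_eq_true, if_false, if_true]
    decide
  · have e0 : h0 = false := by cases h0 with | false => rfl | true => exact absurd (K0 rfl) (by decide)
    have e1 : h1 = false := by cases h1 with | false => rfl | true => exact absurd (K1 rfl) (by decide)
    have e2 : h2 = false := by cases h2 with | false => rfl | true => exact absurd (K2 rfl) (by decide)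
    have e3 : h3 = false := by cases h3 with | false => rfl | true => exact absurd (K3 rfl) (by decide)
    have e4 : h4 = false := by cases h4 with | false => rfl | true => exact absurd (K4 rfl) (by decide)
    simp only [e0, e1, e2, e3, e4, hb5, Bool.false_eq_true, if_false, if_true]
    decide
  · have e0 : h0 = false := by cases h0 with | false => rfl | true => exact absurd (K0 rfl) (by decide)
    have e1 : h1 = false := by cases h1 with | false => rfl | true => exact absurd (K1 rfl) (by decide)
    have e2 : h2 = false := by cases h2 with | false => rfl | true => exact absurd (K2 rfl) (by decide)
    have e3 : h3 = false := by cases h3 with | false => rfl | true => exact absurd (K3 rfl) (by decide)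
    have e4 : h4 = false := by cases h4 with | false => rfl | true => exact absurd (K4 rfl) (by decide)
    have e5 : h5 = false := by cases h5 with | false => rfl | true => exact absurd (K5 rfl) (by decide)
    simp only [e0, e1, e2, e3, e4, e5, hb6, Bool.false_eq_true, if_false, if_true]
    decide
  · have e0 : h0 = false := by cases h0 with | false => rfl | true => exact absurd (K0 rfl) (by decide)
    have e1 : h1 = false := by cases h1 with | false => rfl | true => exact absurd (K1 rfl) (by decide)
    have e2 : h2 = false := by cases h2 with | false => rfl | true => exact absurd (K2 rfl) (by decide)
    have e3 : h3 = false := by cases h3 with | false => rfl | true => exact absurd (K3 rfl) (by decide)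
    have e4 : h4 = false := by cases h4 with | false => rfl | true => exact absurd (K4 rfl) (by decide)
    have e5 : h5 = false := by cases h5 with | false => rfl | true => exact absurd (K5 rfl) (by decide)
    have e6 : h6 = false := by cases h6 with | false => rfl | true => exact absurd (K6 rfl) (by decide)
    simp only [e0, e1, e2, e3, e4, e5, e6, hb7, Bool.false_eq_true, if_false, if_true]
    decide
  · have e0 : h0 = false := by cases h0 with | false => rfl | true => exact absurd (K0 rfl) (by decide)
    have e1 : h1 = false := by cases h1 with | false => rfl | true => exact absurd (K1 rfl) (by decide)
    have e2 : h2 = false := by cases h2 with | false => rfl | true => exact absurd (K2 rfl) (by decide)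
    have e3 : h3 = false := by cases h3 with | false => rfl | true => exact absurd (K3 rfl) (by decide)
    have e4 : h4 = false := by cases h4 with | false => rfl | true => exact absurd (K4 rfl) (by decide)
    have e5 : h5 = false := by cases h5 with | false => rfl | true => exact absurd (K5 rfl) (by decide)
    have e6 : h6 = false := by cases h6 with | false => rfl | true => exact absurd (K6 rfl) (by decide)
    have e7 : h7 = false := by cases h7 with | false => rfl | true => exact absurd (K7 rfl) (by decide)
    simp only [e0, e1, e2, e3, e4, e5, e6, e7, hb8, Bool.false_eq_true, if_false, if_true]
    decide
  · have e0 : h0 = false := by cases h0 with | false => rfl | true => exact absurd (K0 rfl) (by decide)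
    have e1 : h1 = false := by cases h1 with | false => rfl | true => exact absurd (K1 rfl) (by decide)
    have e2 : h2 = false := by cases h2 with | false => rfl | true => exact absurd (K2 rfl) (by decide)
    have e3 : h3 = false := by cases h3 with | false => rfl | true => exact absurd (K3 rfl) (by decide)
    have e4 : h4 = false := by cases h4 with | false => rfl | true => exact absurd (K4 rfl) (by decide)
    have e5 : h5 = false := by cases h5 with | false => rfl | true => exact absurd (K5 rfl) (by decide)
    have e6 : h6 = false := by cases h6 with | false => rfl | true => exact absurd (K6 rfl) (by decide)
    have e7 : h7 = false := by cases h7 with | false => rfl | true => exact absurd (K7 rfl) (by decide)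
    have e8 : h8 = false := by cases h8 with | false => rfl | true => exact absurd (K8 rfl) (by decide)
    simp only [e0, e1, e2, e3, e4, e5, e6, e7, e8, hb9, Bool.false_eq_true, if_false, if_true]
    decide

-- ===== VERDICT (by name: the statement is the Claim_ definition above) =====
theorem categorize_tool_py_spec : Claim_equal_categorize_tool_py := by
  intro name _
  show categorize_tool_py name = categorize_tool_py_alt name
  unfold categorize_tool_py categorize_tool_py_alt
  set low := PySem.Str.lower name with hlow
  have hbv : ((PySem.List.pyRange 0 (PySem.Str.len low) 1).foldl (fun best i =>
      pvLens.foldl (fun best L =>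
        let p := PySem.Dict.getD pvKw (PySem.Str.slice low (some i) (some (i + L))) 10
        if p < best then p else best) best) 10) = (pvV low).foldl min 10 :=
    pv_fold_min (PySem.List.pyRange 0 (PySem.Str.len low) 1) pvLens
      (fun i L => PySem.Dict.getD pvKw (PySem.Str.slice low (some i) (some (i + L))) 10) 10
  simp only [hbv]
  refine pv_final _ _ _ _ _ _ _ _ _ _ ((pvV low).foldl min 10) ?_ ?_ ?_ ?_ ?_ ?_ ?_ ?_ ?_ ?_ ?_
  · rcases PySem.List.foldl_min_mem (pvV low) 10 with h | h
    · exact Or.inl h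
    · rcases pv_V_cases low _ h with h10 | hm
      · exact Or.inl h10
      · exact Or.inr ((pv_matched_iff low _).mp hm)
  · intro hh
    exact (PySem.List.foldl_min_le (pvV low) 10).2 _
      (pv_matched_mem low 0 ((pv_matched_iff low 0).mpr (Or.inl ⟨rfl, hh⟩)))
  · intro hh
    exact (PySem.List.foldl_min_le (pvV low) 10).2 _
        (pv_matched_mem low 1 ((pv_matched_iff low 1).mpr (Or.inr (Or.inl ⟨rfl, hh⟩))))
  · intro hh
    exact (PySem.List.foldl_min_le (pvV low) 10).2 _
        (pv_matched_mem low 2 ((pv_matched_iff low 2).mpr (Or.inr (Or.inr (Or.inl ⟨rfl, hh⟩)))))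
  · intro hh
    exact (PySem.List.foldl_min_le (pvV low) 10).2 _
        (pv_matched_mem low 3 ((pv_matched_iff low 3).mpr (Or.inr (Or.inr (Or.inr (Or.inl ⟨rfl, hh⟩))))))
  · intro hh
    exact (PySem.List.foldl_min_le (pvV low) 10).2 _
        (pv_matched_mem low 4 ((pv_matched_iff low 4).mpr (Or.inr (Or.inr (Or.inr (Or.inr (Or.inl ⟨rfl, hh⟩)))))))
  · intro hh
    exact (PySem.List.foldl_min_le (pvV low) 10).2 _
        (pv_matched_mem low 5 ((pv_matched_iff low 5).mpr (Or.inr (Or.inr (Or.inr (Or.inr (Or.inr (Or.inl ⟨rfl, hh⟩))))))))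
  · intro hh
    exact (PySem.List.foldl_min_le (pvV low) 10).2 _
        (pv_matched_mem low 6 ((pv_matched_iff low 6).mpr (Or.inr (Or.inr (Or.inr (Or.inr (Or.inr (Or.inr (Or.inl ⟨rfl, hh⟩)))))))))
  · intro hh
    exact (PySem.List.foldl_min_le (pvV low) 10).2 _
        (pv_matched_mem low 7 ((pv_matched_iff low 7).mpr (Or.inr (Or.inr (Or.inr (Or.inr (Or.inr (Or.inr (Or.inr (Or.inl ⟨rfl, hh⟩))))))))))
  · intro hh
    exact (PySem.List.foldl_min_le (pvV low) 10).2 _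
        (pv_matched_mem low 8 ((pv_matched_iff low 8).mpr (Or.inr (Or.inr (Or.inr (Or.inr (Or.inr (Or.inr (Or.inr (Or.inr (Or.inl ⟨rfl, hh⟩)))))))))))
  · intro hh
    exact (PySem.List.foldl_min_le (pvV low) 10).2 _
        (pv_matched_mem low 9 ((pv_matched_iff low 9).mpr (Or.inr (Or.inr (Or.inr (Or.inr (Or.inr (Or.inr (Or.inr (Or.inr (Or.inr (⟨rfl, hh⟩))))))))))))
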